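-- pv_equiv track=rewrite | github.com/isundaylee/istaroth | istaroth/rag/text_set.py | get_category_from_filename
-- ===== SOURCE A (Python) =====
-- def get_category_from_filename(filename: str) -> str:
--     """Get the category from a filename by matching its prefix.
--
--     Returns the category name if the filename starts with a known category prefix,
--     otherwise raises ValueError.
--     """
--     category_prefix_map = {
--         "artifact_sets": "artifact_set_",
--         "character_stories": "character_story_",
--         "material_types": "material_type_",
--         "quest": "quest_",
--         "readable": "readable_",
--         "subtitles": "subtitle_",
--         "talk_groups": "talk_group_",
--         "talks": "talk_",
--         "voicelines": "voiceline_",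
--     }
--
--     name_without_ext = filename[:-4] if filename.endswith(".txt") else filename
--
--     for category, prefix in category_prefix_map.items():
--         if name_without_ext.startswith(prefix):
--             return category
--
--     raise ValueError(f"Unknown category prefix in filename: {filename}")
-- ===== SOURCE B (Python) =====
-- def get_category_from_filename(filename: str) -> str:
--     """Get the category from a filename by matching its prefix (longest match wins)."""
--     category_prefix_map = {
--         "artifact_sets": "artifact_set_",
--         "character_stories": "character_story_",
--         "material_types": "material_type_",
--         "quest": "quest_",
--         "readable": "readable_",
--         "subtitles": "subtitle_",
--         "talk_groups": "talk_group_",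
--         "talks": "talk_",
--         "voicelines": "voiceline_",
--     }
--
--     stem = filename[:-4] if filename.endswith(".txt") else filename
--
--     matches = [
--         (category, prefix)
--         for category, prefix in category_prefix_map.items()
--         if stem.startswith(prefix)
--     ]
--     if not matches:
--         raise ValueError(f"Unknown category prefix in filename: {filename}")
--     return max(matches, key=lambda cp: len(cp[1]))[0]
-- ===== Notes on version B (the rewrite author's own statement) =====
-- stated objective: alternative
-- what changed: B collects all matching (category, prefix) pairs and returns the one with the longest matching prefix, instead of relying on the dict's insertion order to resolve the talk_group_/talk_ overlap with a first-match loop.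
import Mathlib
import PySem

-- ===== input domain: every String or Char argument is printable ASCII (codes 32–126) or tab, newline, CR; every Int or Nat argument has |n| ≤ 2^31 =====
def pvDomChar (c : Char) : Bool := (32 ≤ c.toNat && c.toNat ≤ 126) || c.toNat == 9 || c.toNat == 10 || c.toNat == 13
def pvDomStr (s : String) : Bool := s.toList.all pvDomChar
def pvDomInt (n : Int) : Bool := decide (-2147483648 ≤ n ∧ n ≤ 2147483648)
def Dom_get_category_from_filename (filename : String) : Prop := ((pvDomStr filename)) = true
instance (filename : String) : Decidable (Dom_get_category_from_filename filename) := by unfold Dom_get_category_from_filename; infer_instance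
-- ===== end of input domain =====

-- B returns the category whose prefix is the LONGEST match instead of the first match in
-- A's dict insertion order; equal return values proved wherever A returns (Pre_).

-- shared data: the category -> prefix map, in A's insertion order
def pvMap : List (String × String) :=
  [("artifact_sets", "artifact_set_"),
   ("character_stories", "character_story_"),
   ("material_types", "material_type_"),
   ("quest", "quest_"),
   ("readable", "readable_"),
   ("subtitles", "subtitle_"),
   ("talk_groups", "talk_group_"),
   ("talks", "talk_"),
   ("voicelines", "voiceline_")]

-- ===== PORT A =====
-- A's for-loop: return the first category whose prefix matches; "" stands for the
-- ValueError path (excluded by Pre_).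
def pvFirstMatch : List (String × String) → String → String
  | [], _ => ""
  | (c, p) :: t, s => if PySem.Str.startswith s p then c else pvFirstMatch t s

def get_category_from_filename (filename : String) : String :=
  let stem := if PySem.Str.endswith filename ".txt"
              then PySem.Str.slice filename none (some (-4)) else filename
  pvFirstMatch pvMap stem

-- ===== PORT B =====
-- Source B: collect all matching (category, prefix) pairs, then max with key = prefix length
-- (first maximal, like Python's max); "" stands for the ValueError path (excluded by Pre_).
def get_category_from_filename_alt (filename : String) : String :=
  let stem := if PySem.Str.endswith filename ".txt"
              then PySem.Str.slice filename none (some (-4)) else filename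
  let cands := pvMap.filter (fun cp => PySem.Str.startswith stem cp.2)
  match PySem.List.max? cands (fun cp => cp.2.length) with
  | some cp => cp.1
  | none => ""

-- ===== PRECONDITION & SPEC =====
-- Pre_ excludes exactly the filenames whose stem starts with none of the known prefixes:
-- there A raises ValueError (and so does B).
def Pre_get_category_from_filename (filename : String) : Prop :=
  (pvMap.any (fun cp => PySem.Str.startswith
      (if PySem.Str.endswith filename ".txt"
       then PySem.Str.slice filename none (some (-4)) else filename) cp.2)) = true
instance (filename : String) : Decidable (Pre_get_category_from_filename filename) := by
  unfold Pre_get_category_from_filename; infer_instance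

def pvWitness_get_category_from_filename : String := "talk_1.txt"

def Spec_get_category_from_filename (filename : String) (out : String) : Prop := out = get_category_from_filename_alt filename
instance (filename : String) (out : String) : Decidable (Spec_get_category_from_filename filename out) := by unfold Spec_get_category_from_filename; infer_instance

-- ===== CLAIM (what is proved, stated in full; the proofs are below) =====
def Claim_equal_get_category_from_filename : Prop := ∀ (filename : String), Dom_get_category_from_filename filename → Pre_get_category_from_filename filename → Spec_get_category_from_filename filename (get_category_from_filename filename)

-- ===== LEMMAS AND PROOFS =====

-- two incomparable prefixes cannot both be prefixes of the same string
lemma pv_not_both (s p q : String) (h : ¬ p.toList <+: q.toList) (h' : ¬ q.toList <+: p.toList)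
    (hp : PySem.Str.startswith s p = true) : PySem.Str.startswith s q = false := by
  by_contra hq
  have hq : PySem.Str.startswith s q = true := by
    cases hqv : PySem.Str.startswith s q with
    | false => exact absurd hqv hq
    | true => rfl
  have hp' : p.toList <+: s.toList := (PySem.Chars.startswith_iff _ _).mp (by simpa using hp)
  have hq' : q.toList <+: s.toList := (PySem.Chars.startswith_iff _ _).mp (by simpa using hq)
  rcases List.prefix_or_prefix_of_prefix hp' hq' with hpq | hqp
  · exact h hpq
  · exact h' hqp

-- core: on any stem, A's first match equals B's longest match (the only prefixes that can
-- match simultaneously are "talk_group_" and "talk_", where both pick "talk_groups")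
lemma pv_core (s : String) :
    pvFirstMatch pvMap s =
      (match PySem.List.max? (pvMap.filter fun cp => PySem.Str.startswith s cp.2)
          (fun cp => cp.2.length) with
        | some cp => cp.1 | none => "") := by
  by_cases h1 : PySem.Str.startswith s "artifact_set_" = true
  · have k2 := pv_not_both s _ "character_story_" (by decide) (by decide) h1
    have k3 := pv_not_both s _ "material_type_" (by decide) (by decide) h1
    have k4 := pv_not_both s _ "quest_" (by decide) (by decide) h1
    have k5 := pv_not_both s _ "readable_" (by decide) (by decide) h1
    have k6 := pv_not_both s _ "subtitle_" (by decide) (by decide) h1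
    have k7 := pv_not_both s _ "talk_group_" (by decide) (by decide) h1
    have k8 := pv_not_both s _ "talk_" (by decide) (by decide) h1
    have k9 := pv_not_both s _ "voiceline_" (by decide) (by decide) h1
    simp at h1 k2 k3 k4 k5 k6 k7 k8 k9
    simp [pvMap, pvFirstMatch, h1, k2, k3, k4, k5, k6, k7, k8, k9]
    all_goals decide
  · -- no match yet
    by_cases h2 : PySem.Str.startswith s "character_story_" = true
    · have k3 := pv_not_both s _ "material_type_" (by decide) (by decide) h2
      have k4 := pv_not_both s _ "quest_" (by decide) (by decide) h2
      have k5 := pv_not_both s _ "readable_" (by decide) (by decide) h2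
      have k6 := pv_not_both s _ "subtitle_" (by decide) (by decide) h2
      have k7 := pv_not_both s _ "talk_group_" (by decide) (by decide) h2
      have k8 := pv_not_both s _ "talk_" (by decide) (by decide) h2
      have k9 := pv_not_both s _ "voiceline_" (by decide) (by decide) h2
      simp at h1 h2 k3 k4 k5 k6 k7 k8 k9
      simp [pvMap, pvFirstMatch, h1, h2, k3, k4, k5, k6, k7, k8, k9]
      all_goals decide
    · -- no match yet
      by_cases h3 : PySem.Str.startswith s "material_type_" = true
      · have k4 := pv_not_both s _ "quest_" (by decide) (by decide) h3
        have k5 := pv_not_both s _ "readable_" (by decide) (by decide) h3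
        have k6 := pv_not_both s _ "subtitle_" (by decide) (by decide) h3
        have k7 := pv_not_both s _ "talk_group_" (by decide) (by decide) h3
        have k8 := pv_not_both s _ "talk_" (by decide) (by decide) h3
        have k9 := pv_not_both s _ "voiceline_" (by decide) (by decide) h3
        simp at h1 h2 h3 k4 k5 k6 k7 k8 k9
        simp [pvMap, pvFirstMatch, h1, h2, h3, k4, k5, k6, k7, k8, k9]
        all_goals decide
      · -- no match yet
        by_cases h4 : PySem.Str.startswith s "quest_" = true
        · have k5 := pv_not_both s _ "readable_" (by decide) (by decide) h4
          have k6 := pv_not_both s _ "subtitle_" (by decide) (by decide) h4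
          have k7 := pv_not_both s _ "talk_group_" (by decide) (by decide) h4
          have k8 := pv_not_both s _ "talk_" (by decide) (by decide) h4
          have k9 := pv_not_both s _ "voiceline_" (by decide) (by decide) h4
          simp at h1 h2 h3 h4 k5 k6 k7 k8 k9
          simp [pvMap, pvFirstMatch, h1, h2, h3, h4, k5, k6, k7, k8, k9]
          all_goals decide
        · -- no match yet
          by_cases h5 : PySem.Str.startswith s "readable_" = true
          · have k6 := pv_not_both s _ "subtitle_" (by decide) (by decide) h5
            have k7 := pv_not_both s _ "talk_group_" (by decide) (by decide) h5
            have k8 := pv_not_both s _ "talk_" (by decide) (by decide) h5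
            have k9 := pv_not_both s _ "voiceline_" (by decide) (by decide) h5
            simp at h1 h2 h3 h4 h5 k6 k7 k8 k9
            simp [pvMap, pvFirstMatch, h1, h2, h3, h4, h5, k6, k7, k8, k9]
            all_goals decide
          · -- no match yet
            by_cases h6 : PySem.Str.startswith s "subtitle_" = true
            · have k7 := pv_not_both s _ "talk_group_" (by decide) (by decide) h6
              have k8 := pv_not_both s _ "talk_" (by decide) (by decide) h6
              have k9 := pv_not_both s _ "voiceline_" (by decide) (by decide) h6
              simp at h1 h2 h3 h4 h5 h6 k7 k8 k9
              simp [pvMap, pvFirstMatch, h1, h2, h3, h4, h5, h6, k7, k8, k9]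
              all_goals decide
            · -- no match yet
              by_cases h7 : PySem.Str.startswith s "talk_group_" = true
              · have k9 := pv_not_both s _ "voiceline_" (by decide) (by decide) h7
                by_cases h8 : PySem.Str.startswith s "talk_" = true
                · simp at h1 h2 h3 h4 h5 h6 h7 h8 k9
                  simp [pvMap, pvFirstMatch, h1, h2, h3, h4, h5, h6, h7, h8, k9, PySem.List.max?]
                  all_goals decide
                · simp at h1 h2 h3 h4 h5 h6 h7 h8 k9
                  simp [pvMap, pvFirstMatch, h1, h2, h3, h4, h5, h6, h7, h8, k9]
                  all_goals decide
              · -- talk_group_ does not match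
                by_cases h8 : PySem.Str.startswith s "talk_" = true
                · have k9 := pv_not_both s _ "voiceline_" (by decide) (by decide) h8
                  simp at h1 h2 h3 h4 h5 h6 h7 h8 k9
                  simp [pvMap, pvFirstMatch, h1, h2, h3, h4, h5, h6, h7, h8, k9]
                  all_goals decide
                · -- no match yet
                  by_cases h9 : PySem.Str.startswith s "voiceline_" = true
                  · simp at h1 h2 h3 h4 h5 h6 h7 h8 h9
                    simp [pvMap, pvFirstMatch, h1, h2, h3, h4, h5, h6, h7, h8, h9]
                    all_goals decide
                  · simp at h1 h2 h3 h4 h5 h6 h7 h8 h9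
                    simp [pvMap, pvFirstMatch, h1, h2, h3, h4, h5, h6, h7, h8, h9]
                    all_goals decide

-- ===== VERDICT (by name: the statement is the Claim_ definition above) =====
theorem get_category_from_filename_spec : Claim_equal_get_category_from_filename := by
  intro filename _ _
  unfold Spec_get_category_from_filename get_category_from_filename get_category_from_filename_alt
  exact pv_core _
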